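-- pv_equiv track=rewrite | github.com/AntonioCiolino/CampaignCreator | campaign_crafter_api/scripts/validate_route_order.py | paths_would_match
-- ===== SOURCE A (Python) =====
-- def paths_would_match(generic_path: str, specific_path: str) -> bool:
--     """Check if a generic path pattern would match a specific path"""
--     # Simple check: if generic path has parameters that could match specific path segments
--     generic_segments = generic_path.strip("/").split("/")
--     specific_segments = specific_path.strip("/").split("/")
--
--     if len(generic_segments) != len(specific_segments):
--         return False
--
--     for gen_seg, spec_seg in zip(generic_segments, specific_segments):
--         if "{" in gen_seg and "}" in gen_seg:
--             # Parameter segment can match anything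
--             continue
--         elif gen_seg != spec_seg:
--             # Static segments must match exactly
--             return False
--
--     return True
-- ===== SOURCE B (Python) =====
-- def paths_would_match(generic_path: str, specific_path: str) -> bool:
--     """Check if a generic path pattern would match a specific path"""
--     g = generic_path.strip("/")
--     s = specific_path.strip("/")
--     while True:
--         gseg, gsep, g = g.partition("/")
--         sseg, ssep, s = s.partition("/")
--         if not (("{" in gseg and "}" in gseg) or gseg == sseg):
--             return False
--         if gsep != ssep:
--             return False
--         if not gsep:
--             return True
-- ===== Notes on version B (the rewrite author's own statement) =====
-- stated objective: alternative
-- what changed: Replaces A's split-into-lists + length check + zipped segment loop by a streaming matcher that never materialises segment lists: it repeatedly str.partition's both paths at the next '/', compares the two heads (wildcard-aware), and derives segment-count agreement from separator-presence agreement at each step.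
import Mathlib
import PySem

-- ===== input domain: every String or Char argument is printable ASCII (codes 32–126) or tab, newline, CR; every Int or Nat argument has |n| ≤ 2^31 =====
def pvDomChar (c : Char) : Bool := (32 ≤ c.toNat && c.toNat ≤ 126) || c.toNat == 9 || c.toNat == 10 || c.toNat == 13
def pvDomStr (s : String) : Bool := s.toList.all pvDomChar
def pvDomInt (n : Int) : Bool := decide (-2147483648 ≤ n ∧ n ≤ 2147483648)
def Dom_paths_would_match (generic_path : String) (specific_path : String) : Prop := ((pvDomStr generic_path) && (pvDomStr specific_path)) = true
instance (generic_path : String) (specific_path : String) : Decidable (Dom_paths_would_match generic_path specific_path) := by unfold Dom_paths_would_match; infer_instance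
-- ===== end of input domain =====

-- B replaces A's split-into-lists + length check + zipped loop by a streaming partition-based matcher (alternative decomposition, same cost); proved equal on all inputs.


-- ===== PORT A =====
-- A's for-loop over zip(generic_segments, specific_segments) with early return False
def pvLoopA : List (String × String) → Bool
  | [] => true
  | (gen_seg, spec_seg) :: rest =>
    if PySem.Str.isIn "{" gen_seg && PySem.Str.isIn "}" gen_seg then pvLoopA rest
    else if gen_seg ≠ spec_seg then false
    else pvLoopA rest

def paths_would_match (generic_path : String) (specific_path : String) : Bool :=
  let generic_segments := (PySem.Str.split? (PySem.Str.stripChars generic_path "/") "/").getD []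
  let specific_segments := (PySem.Str.split? (PySem.Str.stripChars specific_path "/") "/").getD []
  if generic_segments.length ≠ specific_segments.length then false
  else pvLoopA (generic_segments.zip specific_segments)

-- ===== PORT B =====
-- exact port of str.partition("/") for the one-char separator "/": first component = chars
-- before the first '/', second = the rest starting AT that '/' ([] when there is no '/')
def pvPartitionSlash (l : List Char) : List Char × List Char :=
  (l.takeWhile (· ≠ '/'), l.dropWhile (· ≠ '/'))

-- B's while-loop: one partition step on each path per iteration
def pvLoopB (g s : List Char) : Bool :=
  let gp := pvPartitionSlash g
  let sp := pvPartitionSlash s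
  if (PySem.Chars.isIn ['{'] gp.1 && PySem.Chars.isIn ['}'] gp.1) || gp.1 = sp.1 then
    match hg : gp.2, sp.2 with
    | [], [] => true                      -- gsep = ssep = '' : done, match
    | _ :: g', _ :: s' => pvLoopB g' s'   -- gsep = ssep = '/' : continue on the tails
    | _, _ => false                       -- gsep ≠ ssep
  else false
termination_by g.length
decreasing_by
  have h1 : (g.dropWhile (· ≠ '/')).length ≤ g.length := List.length_dropWhile_le _ _
  have h2 : (pvPartitionSlash g).2 = g.dropWhile (· ≠ '/') := rfl
  rw [h2] at hg
  simp only [hg] at h1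
  simp at h1 ⊢
  omega

def paths_would_match_alt (generic_path : String) (specific_path : String) : Bool :=
  pvLoopB (PySem.Str.stripChars generic_path "/").toList (PySem.Str.stripChars specific_path "/").toList

-- ===== PRECONDITION & SPEC =====
def Spec_paths_would_match (generic_path : String) (specific_path : String) (out : Bool) : Prop := out = paths_would_match_alt generic_path specific_path
instance (generic_path : String) (specific_path : String) (out : Bool) : Decidable (Spec_paths_would_match generic_path specific_path out) := by unfold Spec_paths_would_match; infer_instance

-- ===== CLAIM (what is proved, stated in full; the proofs are below) =====
def Claim_equal_paths_would_match : Prop := ∀ (generic_path : String) (specific_path : String), Dom_paths_would_match generic_path specific_path → Spec_paths_would_match generic_path specific_path (paths_would_match generic_path specific_path)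

-- ===== LEMMAS AND PROOFS =====

-- reference splitter: what Python's x.split("/") produces, in the plainest recursive form
def pvSplitSpec (pre : List Char) : List Char → List (List Char)
  | [] => [pre]
  | c :: rest => if c = '/' then pre :: pvSplitSpec [] rest else pvSplitSpec (pre ++ [c]) rest

theorem pvSplitOn_go_eq : ∀ (fuel : Nat) (l cur : List Char) (acc : List (List Char)),
    l.length < fuel →
    PySem.Chars.splitOn.go ['/'] fuel l cur acc = acc.reverse ++ pvSplitSpec cur.reverse l := by
  intro fuel
  induction fuel with
  | zero => intro l cur acc h; omega
  | succ n ih =>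
    intro l cur acc h
    cases l with
    | nil => simp [PySem.Chars.splitOn.go, pvSplitSpec]
    | cons c rest =>
      by_cases hc : c = '/'
      · subst hc
        have hpre : List.isPrefixOf ['/'] ('/' :: rest) = true := by simp [List.isPrefixOf]
        simp only [PySem.Chars.splitOn.go, hpre, if_true, List.length_cons, List.length_nil,
          List.drop_succ_cons, List.drop_zero]
        rw [ih rest [] (cur.reverse :: acc) (by simp at h; omega)]
        simp [pvSplitSpec]
      · have hpre : List.isPrefixOf ['/'] (c :: rest) = false := by
          simp only [List.isPrefixOf, Bool.and_eq_false_iff, beq_eq_false_iff_ne, ne_eq]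
          exact Or.inl (Ne.symm hc)
        simp only [PySem.Chars.splitOn.go, hpre, Bool.false_eq_true, if_false]
        rw [ih rest (c :: cur) acc (by simp at h ⊢; omega)]
        simp [pvSplitSpec, hc]

theorem pvSplitOn_eq (l : List Char) : PySem.Chars.splitOn l ['/'] = pvSplitSpec [] l := by
  unfold PySem.Chars.splitOn
  rw [pvSplitOn_go_eq (l.length + 1) l [] [] (by omega)]
  simp

-- pvSplitSpec unfolded through one partition step
theorem pvSplitSpec_eq_partition : ∀ (l pre : List Char),
    pvSplitSpec pre l = (pre ++ l.takeWhile (· ≠ '/')) ::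
      (match l.dropWhile (· ≠ '/') with
        | [] => []
        | _ :: r => pvSplitSpec [] r) := by
  intro l
  induction l with
  | nil => intro pre; simp [pvSplitSpec]
  | cons c rest ih =>
    intro pre
    by_cases hc : c = '/'
    · subst hc; simp [pvSplitSpec]
    · simp only [pvSplitSpec, hc, if_false, ih (pre ++ [c]), List.takeWhile_cons,
        List.dropWhile_cons]
      simp [hc]

-- A's check, restated on char lists
def pvLoopAC : List (List Char × List Char) → Bool
  | [] => true
  | (a, b) :: rest =>
    if PySem.Chars.isIn ['{'] a && PySem.Chars.isIn ['}'] a then pvLoopAC rest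
    else if a ≠ b then false
    else pvLoopAC rest

def pvCheckA (gs ss : List (List Char)) : Bool :=
  if gs.length ≠ ss.length then false else pvLoopAC (gs.zip ss)

theorem pvCheckA_cons (a b : List Char) (gs ss : List (List Char)) :
    pvCheckA (a :: gs) (b :: ss) =
      if (PySem.Chars.isIn ['{'] a && PySem.Chars.isIn ['}'] a) || a = b then pvCheckA gs ss
      else false := by
  unfold pvCheckA
  by_cases hlen : gs.length = ss.length
  · by_cases hw : (PySem.Chars.isIn ['{'] a && PySem.Chars.isIn ['}'] a) = true
    · simp [hlen, pvLoopAC, hw]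
    · by_cases hab : a = b
      · subst hab; simp [hlen, pvLoopAC, hw]
      · simp [hlen, pvLoopAC, hw, hab]
  · simp only [List.length_cons]
    simp [hlen]

theorem pvSplitSpec_ne_nil (l : List Char) : pvSplitSpec [] l ≠ [] := by
  rw [pvSplitSpec_eq_partition l []]
  simp

-- the heart of the proof: the streaming partition loop computes A's check on the split lists
theorem pvCheckA_nil_cons (y : List Char) (ys : List (List Char)) :
    pvCheckA [] (y :: ys) = false := by
  simp [pvCheckA]

theorem pvCheckA_cons_nil (y : List Char) (ys : List (List Char)) :
    pvCheckA (y :: ys) [] = false := by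
  simp [pvCheckA]

theorem pvMain : ∀ (n : Nat) (g s : List Char), g.length ≤ n →
    pvCheckA (pvSplitSpec [] g) (pvSplitSpec [] s) = pvLoopB g s := by
  intro n
  induction n with
  | zero =>
    intro g s hg
    have hgnil : g = [] := by cases g <;> simp_all
    subst hgnil
    rw [pvSplitSpec_eq_partition [] [], pvSplitSpec_eq_partition s [],
      List.nil_append, List.nil_append, pvCheckA_cons, pvLoopB]
    simp only [pvPartitionSlash, List.takeWhile_nil, List.dropWhile_nil]
    cases hds : s.dropWhile (· ≠ '/') with
    | nil => congr 1
    | cons b s' =>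
      have hne := pvSplitSpec_ne_nil s'
      congr 1
      cases hx : pvSplitSpec [] s' with
      | nil => exact absurd hx hne
      | cons y ys =>
        show pvCheckA [] (pvSplitSpec [] s') = false
        rw [hx]; exact pvCheckA_nil_cons y ys
  | succ n ih =>
    intro g s hg
    rw [pvSplitSpec_eq_partition g [], pvSplitSpec_eq_partition s [],
      List.nil_append, List.nil_append, pvCheckA_cons, pvLoopB]
    simp only [pvPartitionSlash]
    cases hdg : g.dropWhile (· ≠ '/') with
    | nil =>
      cases hds : s.dropWhile (· ≠ '/') with
      | nil => congr 1
      | cons b s' =>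
        have hne := pvSplitSpec_ne_nil s'
        congr 1
        cases hx : pvSplitSpec [] s' with
        | nil => exact absurd hx hne
        | cons y ys =>
          show pvCheckA [] (pvSplitSpec [] s') = false
          rw [hx]; exact pvCheckA_nil_cons y ys
    | cons a g' =>
      have hlg : g'.length ≤ n := by
        have h1 := List.length_dropWhile_le (fun c => decide (c ≠ '/')) g
        rw [hdg] at h1
        simp at h1
        omega
      cases hds : s.dropWhile (· ≠ '/') with
      | nil =>
        have hne := pvSplitSpec_ne_nil g'
        congr 1
        cases hx : pvSplitSpec [] g' with
        | nil => exact absurd hx hne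
        | cons y ys =>
          show pvCheckA (pvSplitSpec [] g') [] = false
          rw [hx]; exact pvCheckA_cons_nil y ys
      | cons b s' =>
        rw [ih g' s' hlg]
        congr 1

-- A's string-level loop equals the char-level loop on the mapped pairs
theorem pvLoopA_eq_AC : ∀ (ps : List (String × String)),
    pvLoopA ps = pvLoopAC (ps.map (fun p => (p.1.toList, p.2.toList))) := by
  intro ps
  induction ps with
  | nil => rfl
  | cons hd tl ih =>
    obtain ⟨a, b⟩ := hd
    simp only [pvLoopA, pvLoopAC, List.map_cons, PySem.Str.isIn_eq,
      show ("{" : String).toList = ['{'] from rfl, show ("}" : String).toList = ['}'] from rfl]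
    by_cases hw : (PySem.Chars.isIn ['{'] a.toList && PySem.Chars.isIn ['}'] a.toList) = true
    · simp [hw, ih]
    · by_cases hab : a = b
      · subst hab; simp [hw, ih]
      · have hab' : a.toList ≠ b.toList := fun h => hab (String.toList_inj.mp h)
        simp [hw, hab, hab']

-- Python's x.split("/") (via PySem) is pvSplitSpec on the char list
theorem pvSplit_str (t : String) :
    ∃ L, PySem.Str.split? t "/" = some L ∧ L.map String.toList = pvSplitSpec [] t.toList := by
  have h := PySem.Str.split?_map t "/"
  have hsep : ("/" : String).toList = ['/'] := rfl
  rw [hsep] at h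
  unfold PySem.Chars.split? at h
  simp only [List.isEmpty_cons] at h
  cases hL : PySem.Str.split? t "/" with
  | none => rw [hL] at h; simp at h
  | some L =>
    rw [hL] at h
    simp only [Option.map_some] at h
    exact ⟨L, rfl, by injection h with h'; rw [h', pvSplitOn_eq]⟩

-- ===== VERDICT (by name: the statement is the Claim_ definition above) =====
theorem paths_would_match_spec : Claim_equal_paths_would_match := by
  intro g s _
  unfold Spec_paths_would_match paths_would_match paths_would_match_alt
  obtain ⟨GS, hGS, hGSm⟩ := pvSplit_str (PySem.Str.stripChars g "/")
  obtain ⟨SS, hSS, hSSm⟩ := pvSplit_str (PySem.Str.stripChars s "/")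
  rw [hGS, hSS]
  simp only [Option.getD_some]
  rw [← pvMain ((PySem.Str.stripChars g "/").toList.length) _ _ (le_refl _), ← hGSm, ← hSSm]
  unfold pvCheckA
  simp only [List.length_map]
  by_cases hlen : GS.length = SS.length
  · simp only [hlen, ne_eq, not_true_eq_false, if_false]
    rw [pvLoopA_eq_AC, List.zip_map]
    rfl
  · simp [hlen]
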